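-- pv_equiv track=rewrite | github.com/Aasthaengg/IBMdataset | Python_codes/p03088/s287871600.py | check
-- ===== SOURCE A (Python) =====
-- def check(s):
--     if 'AGC' in s:
--         return False
--     for i in range(len(s)-1):
--         l = list(s)
--         l[i],l[i+1]=l[i+1],l[i]
--         t = ''.join(l)
--         if 'AGC' in t:
--             return False
--     return True
-- ===== SOURCE B (Python) =====
-- def check(s):
--     # One pass: a single swap can create 'AGC' only if some window already
--     # reads AGC, GAC, ACG, or A?GC / AG?C (swap the off char into place).
--     for i in range(len(s)):
--         w = s[i:i+4]
--         if w[:3] in ('AGC', 'GAC', 'ACG'):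
--             return False
--         if len(w) == 4 and w[0] == 'A' and w[3] == 'C' and (w[1] == 'G' or w[2] == 'G'):
--             return False
--     return True
-- ===== Notes on version B (the rewrite author's own statement) =====
-- stated objective: faster
-- what changed: Instead of rebuilding the whole string for every adjacent swap and rescanning it for 'AGC' (quadratic), B makes one pass over length-4 windows checking the five local patterns (AGC, GAC, ACG, A?GC, AG?C) that characterise when 'AGC' exists or can be produced by one adjacent swap.
import Mathlib
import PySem

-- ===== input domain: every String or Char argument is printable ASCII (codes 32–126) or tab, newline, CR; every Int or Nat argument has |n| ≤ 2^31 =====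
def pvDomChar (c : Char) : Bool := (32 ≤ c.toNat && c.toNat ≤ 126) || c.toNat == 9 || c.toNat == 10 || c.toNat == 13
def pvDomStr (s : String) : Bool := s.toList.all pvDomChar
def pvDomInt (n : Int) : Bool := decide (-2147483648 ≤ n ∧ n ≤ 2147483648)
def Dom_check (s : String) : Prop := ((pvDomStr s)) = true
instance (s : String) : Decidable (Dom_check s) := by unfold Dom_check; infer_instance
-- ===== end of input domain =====

-- B replaces A's quadratic try-every-swap-and-rescan with one linear pass over
-- length-4 windows checking the five local patterns characterising a (possibly
-- swap-produced) 'AGC'.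

-- ===== PORT A =====
-- l[i], l[i+1] = l[i+1], l[i]  (both reads from the original list, as Python does)
def swapJoin (l : List Char) (i : Nat) : List Char :=
  (l.set i (l.getD (i + 1) ' ')).set (i + 1) (l.getD i ' ')

-- the 'for i in range(len(s)-1)' loop with its early 'return False'
def goA (l : List Char) : List Nat → Bool
  | [] => true
  | i :: rest =>
      if PySem.Chars.isIn ['A', 'G', 'C'] (swapJoin l i) then false else goA l rest

def check (s : String) : Bool :=
  let l := s.toList
  if PySem.Chars.isIn ['A', 'G', 'C'] l then false
  else goA l (List.range (l.length - 1))

-- ===== PORT B =====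
-- the window test of Source B: w[:3] in ('AGC','GAC','ACG'), then the 4-char swap patterns
def bad4 (w : List Char) : Bool :=
  (w.take 3 = ['A', 'G', 'C'] || w.take 3 = ['G', 'A', 'C'] || w.take 3 = ['A', 'C', 'G'])
  || (w.length == 4 && w.getD 0 ' ' == 'A' && w.getD 3 ' ' == 'C'
      && (w.getD 1 ' ' == 'G' || w.getD 2 ' ' == 'G'))

-- 'for i in range(len(s))' with window w = s[i:i+4]: structural recursion over suffixes
def goB : List Char → Bool
  | [] => true
  | c :: t => if bad4 ((c :: t).take 4) then false else goB t

def check_alt (s : String) : Bool := goB s.toList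

-- ===== PRECONDITION & SPEC =====
def Spec_check (s : String) (out : Bool) : Prop := out = check_alt s
instance (s : String) (out : Bool) : Decidable (Spec_check s out) := by unfold Spec_check; infer_instance

-- ===== CLAIM (what is proved, stated in full; the proofs are below) =====
def Claim_equal_check : Prop := ∀ (s : String), Dom_check s → Spec_check s (check s)

-- ===== LEMMAS AND PROOFS =====

-- propositional characterisations
def AbadP (l : List Char) : Prop :=
  PySem.Chars.isIn ['A', 'G', 'C'] l = true ∨
    ∃ i, i + 1 < l.length ∧ PySem.Chars.isIn ['A', 'G', 'C'] (swapJoin l i) = true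

def BbadP (l : List Char) : Prop := ∃ j, bad4 ((l.drop j).take 4) = true

theorem swapJoin_zero (a b : Char) (t : List Char) :
    swapJoin (a :: b :: t) 0 = b :: a :: t := by
  simp [swapJoin]

theorem swapJoin_succ (c : Char) (t : List Char) (i : Nat) :
    swapJoin (c :: t) (i + 1) = c :: swapJoin t i := by
  simp [swapJoin]

theorem goA_eq_false (l : List Char) (r : List Nat) :
    goA l r = false ↔ ∃ i ∈ r, PySem.Chars.isIn ['A', 'G', 'C'] (swapJoin l i) = true := by
  induction r with
  | nil => simp [goA]
  | cons i rest ih =>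
      by_cases h : PySem.Chars.isIn ['A', 'G', 'C'] (swapJoin l i) = true
      · simp [goA, h]
      · simp only [goA, if_neg h, ih]
        constructor
        · rintro ⟨k, hk, hbad⟩; exact ⟨k, List.mem_cons_of_mem _ hk, hbad⟩
        · rintro ⟨k, hk, hbad⟩
          rcases List.mem_cons.mp hk with rfl | hk
          · exact absurd hbad h
          · exact ⟨k, hk, hbad⟩

theorem goB_eq_false (l : List Char) :
    goB l = false ↔ BbadP l := by
  induction l with
  | nil => simp [goB, BbadP, bad4]
  | cons c t ih =>
      by_cases h : bad4 ((c :: t).take 4) = true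
      · simp only [goB, if_pos h, BbadP]
        exact ⟨fun _ => ⟨0, by simpa using h⟩, fun _ => trivial⟩
      · simp only [goB, if_neg h, ih, BbadP]
        constructor
        · rintro ⟨j, hj⟩; exact ⟨j + 1, by simpa using hj⟩
        · rintro ⟨j, hj⟩
          cases j with
          | zero => exact absurd (by simpa using hj) h
          | succ j => exact ⟨j, by simpa using hj⟩

theorem prefix_agc (l : List Char) :
    ['A', 'G', 'C'] <+: l ↔ ∃ t, l = 'A' :: 'G' :: 'C' :: t := by
  constructor
  · rintro ⟨t, rfl⟩; exact ⟨t, rfl⟩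
  · rintro ⟨t, rfl⟩; exact ⟨t, rfl⟩

theorem isIn_cons_iff (c : Char) (t : List Char) :
    PySem.Chars.isIn ['A', 'G', 'C'] (c :: t) = true ↔
      (['A', 'G', 'C'] <+: c :: t) ∨ PySem.Chars.isIn ['A', 'G', 'C'] t = true := by
  rw [PySem.Chars.isIn_iff_infix, PySem.Chars.isIn_iff_infix, List.infix_cons_iff]

theorem prefix_isIn (l : List Char) (h : ['A', 'G', 'C'] <+: l) :
    PySem.Chars.isIn ['A', 'G', 'C'] l = true :=
  (PySem.Chars.isIn_iff_infix _ _).mpr h.isInfix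

theorem BbadP_shift (c : Char) (t : List Char) : BbadP t → BbadP (c :: t) := by
  rintro ⟨j, hj⟩; exact ⟨j + 1, by simpa using hj⟩

-- 'AGC' occurs literally ⇒ some window is bad
theorem isIn_to_BbadP (l : List Char) :
    PySem.Chars.isIn ['A', 'G', 'C'] l = true → BbadP l := by
  induction l with
  | nil => intro h; simp [PySem.Chars.isIn_iff_infix] at h
  | cons c t ih =>
      intro h
      rcases (isIn_cons_iff c t).mp h with hp | hr
      · obtain ⟨r, hr⟩ := (prefix_agc _).mp hp
        simp only [List.cons.injEq] at hr
        obtain ⟨rfl, rfl, rfl⟩ := hr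
        exact ⟨0, by simp [bad4]⟩
      · exact BbadP_shift c t (ih hr)

-- a swap producing 'AGC' ⇒ some window is bad
theorem swap_to_BbadP (l : List Char) (i : Nat) (hi : i + 1 < l.length) :
    PySem.Chars.isIn ['A', 'G', 'C'] (swapJoin l i) = true → BbadP l := by
  induction l generalizing i with
  | nil => simp at hi
  | cons c t ih =>
      intro h
      cases i with
      | zero =>
          -- l = c :: b :: t', swapped = b :: c :: t'
          match t, hi, h with
          | b :: t', _, h =>
            rw [swapJoin_zero] at h
            rcases (isIn_cons_iff _ _).mp h with hp | h2
            · -- 'AGC' is a prefix of b :: c :: t' : original starts 'G' 'A' 'C'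
              obtain ⟨r, hr⟩ := (prefix_agc _).mp hp
              simp only [List.cons.injEq] at hr
              obtain ⟨rfl, rfl, rfl⟩ := hr
              exact ⟨0, by simp [bad4]⟩
            · rcases (isIn_cons_iff _ _).mp h2 with hp | h3
              · -- 'AGC' prefix of c :: t' : original is c 'G' 'C'… with c = 'A'? no: A b G C
                obtain ⟨r, hr⟩ := (prefix_agc _).mp hp
                simp only [List.cons.injEq] at hr
                obtain ⟨rfl, rfl, rfl⟩ := hr
                exact ⟨0, by simp [bad4]⟩
              · exact BbadP_shift _ _ (BbadP_shift _ _ (isIn_to_BbadP t' h3))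
      | succ k =>
          rw [swapJoin_succ] at h
          have hlen : k + 1 < t.length := by simpa using hi
          rcases (isIn_cons_iff _ _).mp h with hp | hr
          · -- c = 'A' and ['G','C'] <+: swapJoin t k
            obtain ⟨r, hr⟩ := (prefix_agc _).mp hp
            have hc : c = 'A' := by
              have := congrArg (fun x => x.headD ' ') hr; simpa using this
            subst hc
            have hgc : swapJoin t k = 'G' :: 'C' :: r := by
              simpa using hr
            cases k with
            | zero =>
                match t, hlen, hgc with
                | b0 :: b1 :: t', _, hgc =>
                  rw [swapJoin_zero] at hgc
                  simp only [List.cons.injEq] at hgc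
                  obtain ⟨rfl, rfl, rfl⟩ := hgc
                  exact ⟨0, by simp [bad4]⟩
            | succ m =>
                match t, hlen, hgc with
                | b0 :: t1, hlen, hgc =>
                  rw [swapJoin_succ] at hgc
                  simp only [List.cons.injEq] at hgc
                  obtain ⟨rfl, hgc⟩ := hgc
                  cases m with
                  | zero =>
                      match t1, hlen, hgc with
                      | b1 :: b2 :: t', _, hgc =>
                        rw [swapJoin_zero] at hgc
                        simp only [List.cons.injEq] at hgc
                        obtain ⟨rfl, rfl⟩ := hgc
                        exact ⟨0, by simp [bad4]⟩
                  | succ m' =>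
                      match t1, hlen, hgc with
                      | b1 :: t2, hlen, hgc =>
                        rw [swapJoin_succ] at hgc
                        simp only [List.cons.injEq] at hgc
                        obtain ⟨rfl, hgc⟩ := hgc
                        exact ⟨0, by simp [bad4]⟩
          · exact BbadP_shift c t (ih k hlen hr)

-- a bad window ⇒ A finds 'AGC' directly or after one swap
theorem AbadP_shift (c : Char) (t : List Char) : AbadP t → AbadP (c :: t) := by
  rintro (h | ⟨i, hi, h⟩)
  · exact Or.inl ((isIn_cons_iff c t).mpr (Or.inr h))
  · refine Or.inr ⟨i + 1, by simpa using Nat.succ_lt_succ hi, ?_⟩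
    rw [swapJoin_succ]
    exact (isIn_cons_iff _ _).mpr (Or.inr h)

theorem BbadP_to_AbadP (l : List Char) : BbadP l → AbadP l := by
  induction l with
  | nil => rintro ⟨j, hj⟩; simp [bad4] at hj
  | cons c t ih =>
      rintro ⟨j, hj⟩
      cases j with
      | succ j => exact AbadP_shift c t (ih ⟨j, by simpa using hj⟩)
      | zero =>
          simp only [List.drop_zero] at hj
          -- expose the first four characters of c :: t
          match c, t, hj with
          | c, [], hj => simp [bad4] at hj
          | c, [b], hj => simp [bad4] at hj
          | c, [b, d], hj =>
              -- window of length 3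
              simp only [bad4, List.take, Bool.or_eq_true, decide_eq_true_eq] at hj
              rcases hj with ((h3 | h3) | h3) | h4
              · simp only [List.cons.injEq] at h3
                obtain ⟨rfl, rfl, rfl, -⟩ := h3
                exact Or.inl (prefix_isIn _ ⟨[], rfl⟩)
              · simp only [List.cons.injEq] at h3
                obtain ⟨rfl, rfl, rfl, -⟩ := h3
                refine Or.inr ⟨0, by simp, ?_⟩
                rw [swapJoin_zero]; exact prefix_isIn _ ⟨[], rfl⟩
              · simp only [List.cons.injEq] at h3
                obtain ⟨rfl, rfl, rfl, -⟩ := h3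
                refine Or.inr ⟨1, by simp, ?_⟩
                rw [swapJoin_succ, swapJoin_zero]; exact prefix_isIn _ ⟨[], rfl⟩
              · simp at h4
          | c, b :: d :: e :: t', hj =>
              simp only [bad4, List.take, Bool.or_eq_true, Bool.and_eq_true,
                decide_eq_true_eq, beq_iff_eq] at hj
              rcases hj with ((h3 | h3) | h3) | h4
              · simp only [List.cons.injEq] at h3
                obtain ⟨rfl, rfl, rfl, -⟩ := h3
                exact Or.inl (prefix_isIn _ ⟨_, rfl⟩)
              · simp only [List.cons.injEq] at h3
                obtain ⟨rfl, rfl, rfl, -⟩ := h3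
                refine Or.inr ⟨0, by simp, ?_⟩
                rw [swapJoin_zero]; exact prefix_isIn _ ⟨_, rfl⟩
              · simp only [List.cons.injEq] at h3
                obtain ⟨rfl, rfl, rfl, -⟩ := h3
                refine Or.inr ⟨1, by simp, ?_⟩
                rw [swapJoin_succ, swapJoin_zero]; exact prefix_isIn _ ⟨_, rfl⟩
              · obtain ⟨⟨⟨-, rfl⟩, rfl⟩, hG⟩ := h4
                rcases hG with rfl | rfl
                · -- A G d C …  : swap positions 2,3 → A G C d …
                  refine Or.inr ⟨2, by simp, ?_⟩
                  rw [swapJoin_succ, swapJoin_succ, swapJoin_zero]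
                  exact prefix_isIn _ ⟨_, rfl⟩
                · -- A b G C … : swap positions 0,1 → b A G C …
                  refine Or.inr ⟨0, by simp, ?_⟩
                  rw [swapJoin_zero]
                  exact (isIn_cons_iff _ _).mpr (Or.inr (prefix_isIn _ ⟨_, rfl⟩))

-- ===== VERDICT (by name: the statement is the Claim_ definition above) =====
theorem check_spec : Claim_equal_check := by
  intro s _
  unfold Spec_check check check_alt
  set l := s.toList with hl
  by_cases hin : PySem.Chars.isIn ['A', 'G', 'C'] l = true
  · have hb : BbadP l := isIn_to_BbadP l hin
    have := (goB_eq_false l).mpr hb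
    simp [hin, this]
  · simp only [hin, Bool.false_eq_true, if_false]
    by_cases hA : goA l (List.range (l.length - 1)) = false
    · rcases (goA_eq_false l _).mp hA with ⟨i, hir, hbad⟩
      have hi : i + 1 < l.length := by
        have := List.mem_range.mp hir; omega
      have hb : BbadP l := swap_to_BbadP l i hi hbad
      rw [hA, (goB_eq_false l).mpr hb]
    · have hA' : goA l (List.range (l.length - 1)) = true := by
        cases h : goA l (List.range (l.length - 1)) with
        | false => exact absurd h hA
        | true => rfl
      have hB : ¬ BbadP l := by
        intro hb
        rcases (BbadP_to_AbadP l hb) with h | ⟨i, hi, h⟩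
        · exact hin h
        · have : i ∈ List.range (l.length - 1) := List.mem_range.mpr (by omega)
          exact hA ((goA_eq_false l _).mpr ⟨i, this, h⟩)
      have : goB l ≠ false := fun h => hB ((goB_eq_false l).mp h)
      rw [hA']
      cases h : goB l with
      | false => exact absurd h this
      | true => rfl
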